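-- pv_equiv track=rewrite | github.com/jumploop/data_structures_and_algorithms | backtracking/排列（元素无重可复选）.py | permuteRepeat
-- ===== SOURCE A (Python) =====
-- from typing import List
--
-- def permuteRepeat(nums: List[int]) -> List[List[int]]:
--     result = []
--     path = []
--     nums = sorted(nums)
--
--     def backtrack():
--         # base case，到达叶子节点
--         if len(path) == len(nums):
--             # 收集叶子节点上的值
--             result.append(path[:])
--             return
--         # 回溯算法标准框架
--         for i in range(len(nums)):
--             # 做选择
--             path.append(nums[i])
--             # 进入下一层回溯树
--             backtrack()
--             # 取消选择
--             path.pop()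
--
--     backtrack()
--     return result
-- ===== SOURCE B (Python) =====
-- def permuteRepeat(nums):
--     s = sorted(nums)
--     result = [[]]
--     for _ in range(len(s)):
--         result = [prefix + [x] for prefix in result for x in s]
--     return result
-- ===== Notes on version B (the rewrite author's own statement) =====
-- stated objective: simpler
-- what changed: Replaces the recursive backtracking with a shared mutable path by an iterative breadth-first product: start from the single empty prefix and extend every prefix by every sorted element, n times.
import Mathlib
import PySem

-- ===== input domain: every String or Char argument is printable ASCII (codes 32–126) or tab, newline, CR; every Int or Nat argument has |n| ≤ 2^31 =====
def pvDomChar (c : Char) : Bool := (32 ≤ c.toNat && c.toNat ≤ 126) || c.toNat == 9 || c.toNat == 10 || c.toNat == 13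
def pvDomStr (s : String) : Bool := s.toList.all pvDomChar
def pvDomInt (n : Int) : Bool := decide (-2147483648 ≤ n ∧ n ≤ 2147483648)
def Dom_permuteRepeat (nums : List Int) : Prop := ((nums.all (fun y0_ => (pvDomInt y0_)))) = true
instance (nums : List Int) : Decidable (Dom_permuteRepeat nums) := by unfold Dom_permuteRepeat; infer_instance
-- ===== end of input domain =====

-- B replaces A's recursive backtracking (shared mutable path) by an iterative breadth-first
-- product: start from the single empty prefix and extend every prefix by every sorted element, n times (simpler).


-- ===== PORT A =====
-- backtrack(): recursion on the remaining depth k = len(nums) - len(path) (Python's base case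
-- `len(path) == len(nums)` is k = 0); `result` is the accumulated list, `path` the current prefix;
-- the `for i in range(len(nums)): path.append(nums[i])` loop is the foldl over s.
def permuteRepeatAux (s : List Int) (k : Nat) (path : List Int) : List (List Int) :=
  match k with
  | 0 => [path]
  | k + 1 => s.foldl (fun acc x => acc ++ permuteRepeatAux s k (path ++ [x])) []

def permuteRepeat (nums : List Int) : List (List Int) :=
  let s := PySem.List.sorted nums (fun x => x) false
  permuteRepeatAux s s.length []

-- ===== PORT B =====
def permuteRepeat_alt (nums : List Int) : List (List Int) :=
  let s := PySem.List.sorted nums (fun x => x) false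
  (List.range s.length).foldl
    (fun result _ => result.flatMap (fun pfx => s.map (fun x => pfx ++ [x]))) [[]]

-- ===== PRECONDITION & SPEC =====
def Spec_permuteRepeat (nums : List Int) (out : List (List Int)) : Prop := out = permuteRepeat_alt nums
instance (nums : List Int) (out : List (List Int)) : Decidable (Spec_permuteRepeat nums out) := by unfold Spec_permuteRepeat; infer_instance

-- ===== CLAIM (what is proved, stated in full; the proofs are below) =====
def Claim_equal_permuteRepeat : Prop := ∀ (nums : List Int), Dom_permuteRepeat nums → Spec_permuteRepeat nums (permuteRepeat nums)

-- ===== LEMMAS AND PROOFS =====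

-- A's recursion step, read from the other side: one more level of backtracking is one
-- breadth-first extension of every already-built prefix.
theorem permuteRepeatAux_succ (s : List Int) (k : Nat) (path : List Int) :
    permuteRepeatAux s (k + 1) path
      = (permuteRepeatAux s k path).flatMap (fun p => s.map (fun x => p ++ [x])) := by
  induction k generalizing path with
  | zero =>
    simp only [permuteRepeatAux]
    rw [show (fun (acc : List (List Int)) (x : Int) => acc ++ [path ++ [x]])
          = (fun acc x => acc ++ [(fun y => path ++ [y]) x]) from rfl,
        PySem.List.foldl_append_singleton_eq_map]
    simp
  | succ k ih =>
    rw [show permuteRepeatAux s (k + 1 + 1) path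
          = s.foldl (fun acc x => acc ++ permuteRepeatAux s (k + 1) (path ++ [x])) [] from rfl,
        PySem.List.foldl_append_eq_flatMap,
        show permuteRepeatAux s (k + 1) path
          = s.foldl (fun acc x => acc ++ permuteRepeatAux s k (path ++ [x])) [] from rfl,
        PySem.List.foldl_append_eq_flatMap]
    simp only [List.nil_append, ih, List.flatMap_assoc]

-- k backtracking levels = k iterations of B's loop.
theorem permuteRepeatAux_eq_foldl (s : List Int) (k : Nat) :
    permuteRepeatAux s k []
      = (List.range k).foldl
          (fun result _ => result.flatMap (fun pfx => s.map (fun x => pfx ++ [x]))) [[]] := by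
  induction k with
  | zero => rfl
  | succ k ih =>
    rw [List.range_succ, List.foldl_append, ← ih, permuteRepeatAux_succ]
    rfl

-- ===== VERDICT (by name: the statement is the Claim_ definition above) =====
theorem permuteRepeat_spec : Claim_equal_permuteRepeat := by
  intro nums _
  show permuteRepeat nums = permuteRepeat_alt nums
  unfold permuteRepeat permuteRepeat_alt
  exact permuteRepeatAux_eq_foldl _ _
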